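-- pv_equiv track=rewrite | github.com/dfhampshire/RInChI | rinchi_tools/rinchi.py | composite_inchi_to_simple
-- ===== SOURCE A (Python) =====
-- from itertools import zip_longest
--
-- def composite_inchi_to_simple(inchi):
--     """ Splits an inchi with multiple disconnected components into a list of connected inchis
--     """
--
--     # Separate the input InChI into the header, formula, and other layers
--     layers = inchi.split("/")
--     header = layers[0]
--     formula = layers[1].split(".")
--     remainder = layers[2:]
--     split_remainder = [formula]
--
--     # Formula is split on '.', other layers are split on ';'
--     for l in remainder:
--         prefix = l[0]
--         ls = l.split(";")
--         split_remainder.append([ls[0]] + [prefix + x for x in ls[1:]])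
--
--     # Transposes a list of split lists into a list of split inchis
--     split_remainder = list(zip_longest(*split_remainder, fillvalue=""))
--
--     # Inchis are reassembled and returned
--     lst = []
--     for i in split_remainder:
--         lst.append([j for j in i if len(j) > 1])
--     return [header + "/" + "/".join(x) for x in lst if x]
-- ===== SOURCE B (Python) =====
-- def composite_inchi_to_simple(inchi):
--     """Recursive peel: instead of splitting every layer into a list and
--     transposing, keep for each layer its unconsumed remainder string and, per
--     round, slice off the first piece of each remainder with find(), emit the
--     assembled simple InChI, drop exhausted layers and recurse."""
--     layers = inchi.split("/")
--     header = layers[0]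
--
--     def build(state):
--         # state: [(sep, prefix_now, prefix_later, remainder)], exhausted layers dropped
--         if not state:
--             return []
--         pieces = []
--         nxt = []
--         for sep, pnow, plater, rem in state:
--             cut = rem.find(sep)
--             if cut < 0:
--                 piece = pnow + rem
--             else:
--                 piece = pnow + rem[:cut]
--                 nxt.append((sep, plater, plater, rem[cut + 1:]))
--             if len(piece) > 1:
--                 pieces.append(piece)
--         tail = build(nxt)
--         if pieces:
--             return [header + "/" + "/".join(pieces)] + tail
--         return tail
--
--     init = [(".", "", "", layers[1])] + [(";", "", l[0], l) for l in layers[2:]]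
--     return build(init)
-- ===== Notes on version B (the rewrite author's own statement) =====
-- stated objective: alternative
-- what changed: B never builds the per-layer split lists or a transpose: it keeps one unconsumed remainder string per layer and recursively peels one piece off each remainder per round with find()/slicing, emitting each simple InChI as it goes and dropping exhausted layers, instead of A's split-every-layer, prefix, zip_longest-transpose, filter pipeline.
-- outside the precondition, e.g. on composite_inchi_to_simple('abc'): A raises IndexError, B raises IndexError; on composite_inchi_to_simple('a/b.c//d'): A raises IndexError, B raises IndexError
import Mathlib
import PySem

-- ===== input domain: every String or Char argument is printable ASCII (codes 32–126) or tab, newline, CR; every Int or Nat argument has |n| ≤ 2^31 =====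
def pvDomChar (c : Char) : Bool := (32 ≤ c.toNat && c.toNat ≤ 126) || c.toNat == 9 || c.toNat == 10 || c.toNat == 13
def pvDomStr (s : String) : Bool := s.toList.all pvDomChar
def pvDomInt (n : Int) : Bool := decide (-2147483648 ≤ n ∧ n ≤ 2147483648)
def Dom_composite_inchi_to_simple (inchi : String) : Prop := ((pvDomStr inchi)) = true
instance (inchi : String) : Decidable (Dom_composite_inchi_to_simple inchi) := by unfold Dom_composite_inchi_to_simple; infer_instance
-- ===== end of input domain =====

-- B replaces A's split-everything-then-transpose (zip_longest) pipeline by a recursive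
-- peel that keeps only each layer's unconsumed remainder string, slices one piece off
-- every remainder per round with find(), emits that round's simple InChI and recurses,
-- dropping exhausted layers; alternative decomposition, same return value.

-- shared helper: s.split(sep) for a non-empty separator
def pySplit (s sep : String) : List String := (PySem.Str.split? s sep).getD []

-- ===== PORT A =====
-- itertools.zip_longest(*xss, fillvalue=fill), rows as lists
def pyZipLongest (xss : List (List String)) (fill : String) : List (List String) :=
  (List.range ((xss.map List.length).foldl max 0)).map
    (fun i => xss.map (fun xs => xs.getD i fill))

def composite_inchi_to_simple (inchi : String) : List String :=
  match pySplit inchi "/" with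
  | [] => []
  | [_] => []        -- Python raises IndexError on layers[1]; excluded by Pre_
  | header :: l1 :: remainder =>
    let formula := pySplit l1 "."
    let split_remainder := remainder.foldl (fun acc l =>
        let pfx : String := match PySem.Str.pyGet? l 0 with
          | some c => String.ofList [c]
          | none => ""            -- Python raises IndexError here; excluded by Pre_
        let ls := pySplit l ";"
        acc ++ [ls.headD "" :: ls.tail.map (fun x => pfx ++ x)]) [formula]
    let rows := pyZipLongest split_remainder ""
    let lst := rows.foldl (fun acc r => acc ++ [r.filter (fun j => 1 < PySem.Str.len j)]) []
    (lst.filter (fun x => !x.isEmpty)).map (fun x => header ++ "/" ++ PySem.Str.join "/" x)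

-- ===== PORT B =====
-- one peel round of Source B's build: walks the state list, slicing the first piece off
-- every remainder with find(); returns (pieces of this round, surviving state).
-- Source B's separators are the single characters '.' and ';', kept here as Char.
def stepB : List (Char × String × String × String) →
    List String × List (Char × String × String × String)
  | [] => ([], [])
  | (sep, pnow, plater, rem) :: rest =>
    let pr := stepB rest
    let cut := PySem.Str.find rem (String.ofList [sep])
    if cut < 0 then
      let piece := pnow ++ rem
      ((if 1 < PySem.Str.len piece then piece :: pr.1 else pr.1), pr.2)
    else
      let piece := pnow ++ PySem.Str.slice rem none (some cut)
      ((if 1 < PySem.Str.len piece then piece :: pr.1 else pr.1),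
        (sep, plater, plater, PySem.Str.slice rem (some (cut + 1)) none) :: pr.2)

-- termination measure for buildB (proof artefact, not part of Source B's logic)
def stMeasure (s : List (Char × String × String × String)) : Nat :=
  (s.map (fun e => e.2.2.2.toList.length + 1)).sum

theorem stepB_measure (s : List (Char × String × String × String)) :
    stMeasure (stepB s).2 + s.length ≤ stMeasure s := by
  induction s with
  | nil => simp [stepB, stMeasure]
  | cons e rest ih =>
    obtain ⟨sep, pnow, plater, rem⟩ := e
    by_cases hcut : PySem.Str.find rem (String.ofList [sep]) < 0
    · simp only [stepB, if_pos hcut, stMeasure, List.map_cons, List.sum_cons,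
        List.length_cons] at *
      omega
    · have hf : (0:Int) ≤ PySem.Chars.find rem.toList [sep] := by
        simp [PySem.Str.find_eq] at hcut
        simpa using hcut
      have hk : (PySem.Chars.find rem.toList [sep]).toNat + 1 ≤ rem.toList.length := by
        have hpre := (PySem.Chars.find_spec hf).1
        have h1 : 1 ≤ (rem.toList.drop (PySem.Chars.find rem.toList [sep]).toNat).length := by
          have := hpre.length_le
          simpa using this
        rw [List.length_drop] at h1
        omega
      have hlen : (PySem.Str.slice rem (some (PySem.Str.find rem (String.ofList [sep]) + 1)) none).toList.length
          + 1 ≤ rem.toList.length := by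
        have h1 : (PySem.Str.slice rem (some (PySem.Str.find rem (String.ofList [sep]) + 1)) none).toList
            = rem.toList.drop (PySem.Chars.find rem.toList [sep] + 1).toNat := by
          rw [PySem.Str.toList_slice, PySem.Str.find_eq, PySem.Chars.slice_eq_listSlice,
            show (String.ofList [sep]).toList = [sep] from by simp,
            PySem.List.slice_from _ (by omega : (0:Int) ≤ PySem.Chars.find rem.toList [sep] + 1)]
        rw [h1, List.length_drop]
        omega
      simp only [stMeasure] at ih
      simp only [stepB, if_neg hcut, stMeasure, List.map_cons, List.sum_cons,
        List.length_cons]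
      omega

-- Source B's recursive build: emit this round's InChI (if any pieces survive) and recurse
def buildB (header : String) (state : List (Char × String × String × String)) :
    List String :=
  if _h : state = [] then []
  else
    let pr := stepB state
    (if pr.1.isEmpty then [] else [header ++ "/" ++ PySem.Str.join "/" pr.1]) ++
      buildB header pr.2
termination_by stMeasure state
decreasing_by
  have h1 := stepB_measure state
  have h2 : state.length ≠ 0 := by simpa using _h
  omega

def composite_inchi_to_simple_alt (inchi : String) : List String :=
  match pySplit inchi "/" with
  | [] => []
  | [_] => []        -- Python raises IndexError on layers[1]; excluded by Pre_
  | header :: l1 :: rest =>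
    let init := ('.', "", "", l1) :: rest.map (fun l =>
      (';', "",
        (match PySem.Str.pyGet? l 0 with
          | some c => String.ofList [c]
          | none => ""),          -- Python raises IndexError here; excluded by Pre_
        l))
    buildB header init

-- ===== PRECONDITION & SPEC =====
-- Pre_ excludes exactly the inputs where Python A raises IndexError: inputs that split
-- into fewer than two layers, or whose split has an empty layer after the second
-- (prefix indexing of an empty layer).
def Pre_composite_inchi_to_simple (inchi : String) : Prop :=
  2 ≤ (pySplit inchi "/").length ∧ ∀ l ∈ (pySplit inchi "/").drop 2, l ≠ ""
instance (inchi : String) : Decidable (Pre_composite_inchi_to_simple inchi) := by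
  unfold Pre_composite_inchi_to_simple; infer_instance

def pvWitness_composite_inchi_to_simple : String := "InChI=1S/C2H6O.CH4/c1-2-3;h1"

def Spec_composite_inchi_to_simple (inchi : String) (out : List String) : Prop :=
  out = composite_inchi_to_simple_alt inchi
instance (inchi : String) (out : List String) : Decidable (Spec_composite_inchi_to_simple inchi out) := by
  unfold Spec_composite_inchi_to_simple; infer_instance

-- ===== CLAIM (what is proved, stated in full; the proofs are below) =====
def Claim_equal_composite_inchi_to_simple : Prop := ∀ (inchi : String), Dom_composite_inchi_to_simple inchi → Pre_composite_inchi_to_simple inchi → Spec_composite_inchi_to_simple inchi (composite_inchi_to_simple inchi)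

-- ===== LEMMAS AND PROOFS =====

-- ---------- generic list facts ----------

-- apply f to the head only
def mapHead {α : Type} (f : α → α) : List α → List α
  | [] => []
  | h :: t => f h :: t

-- ---------- single-character split: splitOn s [c] as a structural peel ----------

-- structural form of s.split(c) for a single character
def split1 (c : Char) (l : List Char) : List (List Char) :=
  if _h : l.dropWhile (· ≠ c) = [] then [l.takeWhile (· ≠ c)]
  else l.takeWhile (· ≠ c) :: split1 c (l.dropWhile (· ≠ c)).tail
termination_by l.length
decreasing_by
  have hle : (l.dropWhile (· ≠ c)).length ≤ l.length := List.length_dropWhile_le _ _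
  have hpos : 0 < (l.dropWhile (· ≠ c)).length := List.length_pos_of_ne_nil _h
  simp only [List.length_tail]
  omega

theorem split1_nil (c : Char) : split1 c [] = [[]] := by
  rw [split1]; simp

theorem split1_cons_self (c : Char) (l : List Char) :
    split1 c (c :: l) = [] :: split1 c l := by
  have hdw : List.dropWhile (fun x => decide (x ≠ c)) (c :: l) = c :: l := by
    rw [List.dropWhile_cons, if_neg (by simp)]
  have htw : List.takeWhile (fun x => decide (x ≠ c)) (c :: l) = [] := by
    rw [List.takeWhile_cons, if_neg (by simp)]
  rw [split1, hdw, htw, dif_neg (by simp), List.tail_cons]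

theorem split1_cons_ne (c ch : Char) (l : List Char) (h : ch ≠ c) :
    split1 c (ch :: l) = mapHead (fun x => ch :: x) (split1 c l) := by
  have hdw : List.dropWhile (fun x => decide (x ≠ c)) (ch :: l)
      = List.dropWhile (fun x => decide (x ≠ c)) l := by
    rw [List.dropWhile_cons, if_pos (by simp [h])]
  have htw : List.takeWhile (fun x => decide (x ≠ c)) (ch :: l)
      = ch :: List.takeWhile (fun x => decide (x ≠ c)) l := by
    rw [List.takeWhile_cons, if_pos (by simp [h])]
  rw [split1, hdw, htw]
  conv_rhs => rw [split1]
  by_cases hd : List.dropWhile (fun x => decide (x ≠ c)) l = []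
  · rw [dif_pos hd, dif_pos hd]; rfl
  · rw [dif_neg hd, dif_neg hd]; rfl

theorem split1_ne_nil (c : Char) (l : List Char) : split1 c l ≠ [] := by
  rw [split1]
  by_cases hd : List.dropWhile (fun x => decide (x ≠ c)) l = []
  · rw [dif_pos hd]; simp
  · rw [dif_neg hd]; simp

-- splitOn's fuel loop computes split1, one accumulator at a time
theorem splitOn_go_spec (c : Char) (fuel : Nat) (l cur : List Char)
    (acc : List (List Char)) (hf : l.length < fuel) :
    PySem.Chars.splitOn.go [c] fuel l cur acc
      = acc.reverse ++ mapHead (fun x => cur.reverse ++ x) (split1 c l) := by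
  induction fuel generalizing l cur acc with
  | zero => omega
  | succ n ih =>
    cases l with
    | nil =>
      simp [PySem.Chars.splitOn.go, split1_nil, mapHead]
    | cons ch rest =>
      rw [PySem.Chars.splitOn.go]
      by_cases hc : ch = c
      · subst hc
        have : [ch].isPrefixOf (ch :: rest) = true := by simp [List.isPrefixOf]
        rw [if_pos this]
        simp only [List.length_cons] at hf
        rw [ih _ _ _ (by simp; omega),
          show List.drop [ch].length (ch :: rest) = rest from by simp, split1_cons_self]
        rcases hsp : split1 ch rest with _ | ⟨h0, t0⟩
        · exact absurd hsp (split1_ne_nil ch rest)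
        · simp [mapHead]
      · have : [c].isPrefixOf (ch :: rest) = false := by
          simp [List.isPrefixOf]; exact fun h => absurd h.symm hc
        rw [if_neg (by simp [this])]
        simp only [List.length_cons] at hf
        rw [ih _ _ _ (by omega)]
        rw [split1_cons_ne c ch rest hc]
        rcases hsp : split1 c rest with _ | ⟨h0, t0⟩
        · exact absurd hsp (split1_ne_nil c rest)
        · simp [mapHead]

theorem splitOn_single (c : Char) (l : List Char) :
    PySem.Chars.splitOn l [c] = split1 c l := by
  unfold PySem.Chars.splitOn
  rw [splitOn_go_spec c (l.length + 1) l [] [] (by omega)]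
  rcases hsp : split1 c l with _ | ⟨h0, t0⟩
  · exact absurd hsp (split1_ne_nil c l)
  · simp [mapHead]

-- pySplit with a single-character separator, as Strings
theorem pySplit_single (s : String) (c : Char) :
    pySplit s (String.ofList [c]) = (split1 c s.toList).map String.ofList := by
  have h1 := PySem.Str.split?_map s (String.ofList [c])
  rw [show (String.ofList [c]).toList = [c] from by simp] at h1
  have h2 : PySem.Chars.split? s.toList [c] = some (PySem.Chars.splitOn s.toList [c]) := by
    simp [PySem.Chars.split?]
  rw [h2, splitOn_single] at h1
  cases hs : PySem.Str.split? s (String.ofList [c]) with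
  | none => rw [hs] at h1; simp at h1
  | some xs =>
    rw [hs] at h1
    simp only [Option.map_some, Option.some.injEq] at h1
    unfold pySplit
    rw [hs, Option.getD_some]
    have : xs = (xs.map String.toList).map String.ofList := by
      simp [List.map_map, Function.comp_def, String.ofList_toList]
    rw [this, h1]

-- ---------- find for a single character: the peel indices ----------

theorem find_go_shift (c : Char) (l : List Char) (k : Nat) :
    PySem.Chars.find.go [c] l k
      = if PySem.Chars.find.go [c] l 0 = -1 then -1 else PySem.Chars.find.go [c] l 0 + k := by
  induction l generalizing k with
  | nil =>
    rw [PySem.Chars.find.go]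
    norm_num
    rw [PySem.Chars.find.go]
    simp
  | cons ch t ih =>
    by_cases hp : [c].isPrefixOf (ch :: t) = true
    · have h0 : PySem.Chars.find.go [c] (ch :: t) 0 = (0:Int) := by
        rw [PySem.Chars.find.go, if_pos hp]; rfl
      rw [PySem.Chars.find.go, if_pos hp, h0]
      simp
    · have hstep : ∀ m : Nat, PySem.Chars.find.go [c] (ch :: t) m
          = PySem.Chars.find.go [c] t (m + 1) := by
        intro m; rw [PySem.Chars.find.go, if_neg hp]
      have hge : (-1:Int) ≤ PySem.Chars.find.go [c] t 0 := by
        have := PySem.Chars.neg_one_le_find t [c]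
        simpa [PySem.Chars.find] using this
      rw [hstep k, hstep 0, ih (k + 1), ih 1]
      by_cases hg : PySem.Chars.find.go [c] t 0 = -1
      · simp [hg]
      · rw [if_neg hg, if_neg hg, if_neg (by omega)]
        push_cast
        ring

theorem find_cons (c ch : Char) (l : List Char) :
    PySem.Chars.find (ch :: l) [c]
      = if ch = c then 0
        else (if PySem.Chars.find l [c] = -1 then -1 else PySem.Chars.find l [c] + 1) := by
  by_cases hc : ch = c
  · subst hc
    rw [if_pos rfl]
    unfold PySem.Chars.find
    rw [PySem.Chars.find.go, if_pos (by simp [List.isPrefixOf])]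
    rfl
  · rw [if_neg hc]
    unfold PySem.Chars.find
    rw [PySem.Chars.find.go,
      if_neg (by simp [List.isPrefixOf]; exact fun h => absurd h.symm hc),
      find_go_shift c l 1]
    norm_num

-- find < 0: no separator, the whole remainder is the last piece
theorem split1_of_find_neg (c : Char) (l : List Char)
    (h : PySem.Chars.find l [c] < 0) : split1 c l = [l] := by
  induction l with
  | nil => exact split1_nil c
  | cons ch t ih =>
    rw [find_cons] at h
    by_cases hc : ch = c
    · rw [if_pos hc] at h; omega
    · rw [if_neg hc] at h
      have hge := PySem.Chars.neg_one_le_find t [c]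
      by_cases hg : PySem.Chars.find t [c] = -1
      · rw [split1_cons_ne c ch t hc, ih (by omega), mapHead]
      · rw [if_neg hg] at h; omega

theorem toNat_add_one (a : Int) (h : 0 ≤ a) : (a + 1).toNat = a.toNat + 1 := by omega

-- find ≥ 0: peel off l.take k, continue after the separator
theorem split1_of_find_nonneg (c : Char) (l : List Char)
    (h : 0 ≤ PySem.Chars.find l [c]) :
    split1 c l
      = l.take (PySem.Chars.find l [c]).toNat
          :: split1 c (l.drop ((PySem.Chars.find l [c]).toNat + 1)) := by
  induction l with
  | nil =>
    exfalso
    have : PySem.Chars.find ([] : List Char) [c] = -1 := by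
      unfold PySem.Chars.find
      rw [PySem.Chars.find.go]
      simp
    omega
  | cons ch t ih =>
    rw [find_cons]
    by_cases hc : ch = c
    · subst hc
      rw [if_pos rfl]
      simpa using split1_cons_self ch t
    · rw [if_neg hc]
      have hge := PySem.Chars.neg_one_le_find t [c]
      by_cases hg : PySem.Chars.find t [c] = -1
      · exfalso
        rw [find_cons, if_neg hc, if_pos hg] at h
        omega
      · rw [if_neg hg]
        have hf : 0 ≤ PySem.Chars.find t [c] := by omega
        rw [toNat_add_one _ hf, split1_cons_ne c ch t hc, ih hf, mapHead,
          List.take_succ_cons, List.drop_succ_cons]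

-- ---------- the reference pipeline both ports are reduced to ----------

-- prefixed column of one layer (A's [ls[0]] + [prefix + x for x in ls[1:]])
def prefCol (p : String) (c : List String) : List String :=
  c.headD "" :: c.tail.map (fun x => p ++ x)

-- the column/prefix pairs A's pipeline ranges over
def colPairs (l1 : String) (rest : List String) : List (List String × String) :=
  (pySplit l1 ".", "") :: rest.map (fun l =>
    (pySplit l ";", match PySem.Str.pyGet? l 0 with
      | some c => String.ofList [c]
      | none => ""))

theorem sum_tail_le (cols : List (List String)) :
    ((cols.map List.tail).map List.length).sum ≤ (cols.map List.length).sum := by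
  induction cols with
  | nil => simp
  | cons c t ih =>
    simp only [List.map_cons, List.sum_cons, List.length_tail]
    omega

theorem sum_tail_lt (cols : List (List String)) (h : ¬ cols.all List.isEmpty = true) :
    ((cols.map List.tail).map List.length).sum < (cols.map List.length).sum := by
  induction cols with
  | nil => simp at h
  | cons c t ih =>
    simp only [List.all_cons, Bool.and_eq_true, not_and_or] at h
    simp only [List.map_cons, List.sum_cons, List.length_tail]
    rcases h with h | h
    · have hc : c ≠ [] := by simpa [List.isEmpty_iff] using h
      have h1 : 0 < c.length := List.length_pos_of_ne_nil hc
      have h2 := sum_tail_le t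
      omega
    · have := ih h
      have h2 := sum_tail_le t
      omega

-- transpose-with-""-fill, written as the recursion B follows
def transposeRec (cols : List (List String)) : List (List String) :=
  if cols.all List.isEmpty then []
  else (cols.map (fun col => col.headD "")) :: transposeRec (cols.map List.tail)
termination_by (cols.map List.length).sum
decreasing_by
  have h2 := sum_tail_lt cols (by simpa using ‹¬ cols.all List.isEmpty = true›)
  simpa [List.map_subtype, List.unattach_attach, List.map_map] using h2

-- assemble the output rows: keep pieces longer than 1, drop empty rows
def emitRows (header : String) (rows : List (List String)) : List String :=
  rows.filterMap (fun r =>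
    if (r.filter (fun j => 1 < PySem.Str.len j)).isEmpty then none
    else some (header ++ "/" ++ PySem.Str.join "/" (r.filter (fun j => 1 < PySem.Str.len j))))

-- ---------- A reduces to emitRows ∘ pyZipLongest ----------

theorem splitOn_go_ne_nil (sep : List Char) (fuel : Nat) (l cur : List Char)
    (acc : List (List Char)) : PySem.Chars.splitOn.go sep fuel l cur acc ≠ [] := by
  induction fuel generalizing l cur acc with
  | zero => simp [PySem.Chars.splitOn.go]
  | succ n ih =>
    cases l with
    | nil => simp [PySem.Chars.splitOn.go]
    | cons c rest =>
      rw [PySem.Chars.splitOn.go]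
      split
      · exact ih _ _ _
      · exact ih _ _ _

theorem pySplit_ne_nil (s sep : String) (h : sep ≠ "") : pySplit s sep ≠ [] := by
  have hsep : sep.toList ≠ [] := by simp_all
  simp [pySplit, PySem.Str.split?, PySem.Chars.split?, List.isEmpty_iff, hsep,
    PySem.Chars.splitOn]
  exact splitOn_go_ne_nil _ _ _ _ _

theorem prefCol_empty_prefix (c : List String) (hc : c ≠ []) : prefCol "" c = c := by
  cases c with
  | nil => exact absurd rfl hc
  | cons h t => simp [prefCol]

-- the generic reshaping: A's two folds + filter + map are emitRows
theorem folds_eq_emitRows (header : String) (rows : List (List String)) :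
    (((rows.foldl (fun acc r => acc ++ [r.filter (fun j => 1 < PySem.Str.len j)]) []).filter
        (fun x => !x.isEmpty)).map (fun x => header ++ "/" ++ PySem.Str.join "/" x))
      = emitRows header rows := by
  rw [PySem.List.foldl_append_singleton_eq_map, List.nil_append]
  unfold emitRows
  induction rows with
  | nil => rfl
  | cons r t ih =>
    simp only [List.map_cons, List.filterMap_cons]
    by_cases hp : (List.filter (fun j => decide (1 < PySem.Str.len j)) r).isEmpty = true
    · rw [List.filter_cons_of_neg (by simpa using hp), if_pos hp, ih]
    · rw [List.filter_cons_of_pos (by simpa using hp), if_neg hp, List.map_cons, ih]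

-- port A at a successful split is emitRows of the zip_longest transpose
theorem A_form (inchi header l1 : String) (rest : List String)
    (h : pySplit inchi "/" = header :: l1 :: rest) :
    composite_inchi_to_simple inchi
      = emitRows header (pyZipLongest ((colPairs l1 rest).map (fun cp => prefCol cp.2 cp.1)) "") := by
  unfold composite_inchi_to_simple
  rw [h]
  dsimp only
  have hsr : rest.foldl (fun acc l =>
        acc ++ [(pySplit l ";").headD "" ::
          (pySplit l ";").tail.map (fun x =>
            (match PySem.Str.pyGet? l 0 with
              | some c => String.ofList [c]
              | none => "") ++ x)]) [pySplit l1 "."]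
      = (colPairs l1 rest).map (fun cp => prefCol cp.2 cp.1) := by
    rw [PySem.List.foldl_append_singleton_eq_map]
    simp only [colPairs, List.map_cons, List.map_map]
    rw [prefCol_empty_prefix _ (pySplit_ne_nil l1 "." (by decide))]
    rfl
  rw [hsr, folds_eq_emitRows]

-- ---------- pyZipLongest is transposeRec ----------

theorem foldl_max_init (L : List Nat) (a : Nat) :
    L.foldl max a = max a (L.foldl max 0) := by
  induction L generalizing a with
  | nil => simp
  | cons x t ih =>
    simp only [List.foldl_cons]
    rw [ih (max a x), ih (max 0 x), Nat.zero_max, Nat.max_assoc]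

theorem foldl_max_zero_iff (L : List Nat) :
    L.foldl max 0 = 0 ↔ ∀ x ∈ L, x = 0 := by
  induction L with
  | nil => simp
  | cons x t ih =>
    simp only [List.foldl_cons, Nat.zero_max]
    rw [foldl_max_init t x]
    simp [Nat.max_eq_zero_iff, ih]

theorem foldl_max_pred (L : List Nat) (a : Nat) :
    (L.map Nat.pred).foldl max (Nat.pred a) = Nat.pred (L.foldl max a) := by
  induction L generalizing a with
  | nil => simp
  | cons x t ih =>
    simp only [List.map_cons, List.foldl_cons]
    rw [Nat.pred_max_pred, ih (max a x)]

theorem getD_tail (xs : List String) (i : Nat) (d : String) :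
    xs.tail.getD i d = xs.getD (i + 1) d := by
  cases xs <;> simp [List.getD]

theorem pyZipLongest_eq_transposeRec_aux (n : Nat) :
    ∀ cols : List (List String), (cols.map List.length).foldl max 0 = n →
      pyZipLongest cols "" = transposeRec cols := by
  induction n with
  | zero =>
    intro cols hn
    rw [transposeRec, if_pos]
    · unfold pyZipLongest
      rw [hn]
      simp
    · rw [foldl_max_zero_iff] at hn
      simp only [List.all_eq_true]
      intro x hx
      have := hn x.length (List.mem_map_of_mem hx)
      simpa [List.isEmpty_iff, List.length_eq_zero_iff] using this
  | succ n ih =>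
    intro cols hn
    have hne : ¬ cols.all List.isEmpty = true := by
      intro hall
      have : (cols.map List.length).foldl max 0 = 0 := by
        rw [foldl_max_zero_iff]
        intro x hx
        rcases List.mem_map.mp hx with ⟨c, hc, rfl⟩
        have := (List.all_eq_true.mp hall) c hc
        simpa [List.isEmpty_iff, List.length_eq_zero_iff] using this
      omega
    rw [transposeRec, if_neg hne]
    unfold pyZipLongest
    rw [hn, List.range_succ_eq_map, List.map_cons, List.map_map]
    congr 1
    · exact List.map_congr_left (fun xs _ => by cases xs <;> simp [List.getD])
    · have hlen : (cols.map List.tail).map List.length = (cols.map List.length).map Nat.pred := by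
        simp only [List.map_map]
        exact List.map_congr_left (fun xs _ => by simp [List.length_tail])
      have hmax : ((cols.map List.tail).map List.length).foldl max 0 = n := by
        rw [hlen, show (0:Nat) = Nat.pred 0 from rfl, foldl_max_pred, hn]
        rfl
      rw [← ih (cols.map List.tail) hmax]
      unfold pyZipLongest
      rw [hmax]
      apply List.map_congr_left
      intro i _
      simp only [Function.comp_apply, List.map_map]
      exact List.map_congr_left (fun xs _ => by
        simp only [Function.comp_apply]
        rw [getD_tail])

theorem pyZipLongest_eq_transposeRec (cols : List (List String)) :
    pyZipLongest cols "" = transposeRec cols :=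
  pyZipLongest_eq_transposeRec_aux _ cols rfl

-- ---------- B reduces to emitRows ∘ transposeRec ----------

-- the prefixed column a state element still has to produce
def stateToCol (e : Char × String × String × String) : List String :=
  match (split1 e.1 e.2.2.2.toList).map String.ofList with
  | [] => []
  | h :: t => (e.2.1 ++ h) :: t.map (fun x => e.2.2.1 ++ x)

theorem slice_to_toList (rem : String) (f : Int) (hf : 0 ≤ f) :
    (PySem.Str.slice rem none (some f)).toList = rem.toList.take f.toNat := by
  rw [PySem.Str.toList_slice, PySem.Chars.slice_eq_listSlice, PySem.List.slice_to _ hf]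

theorem slice_from_toList (rem : String) (f : Int) (hf : 0 ≤ f) :
    (PySem.Str.slice rem (some f) none).toList = rem.toList.drop f.toNat := by
  rw [PySem.Str.toList_slice, PySem.Chars.slice_eq_listSlice, PySem.List.slice_from _ hf]

theorem find_str_eq (sep : Char) (rem : String) :
    PySem.Str.find rem (String.ofList [sep]) = PySem.Chars.find rem.toList [sep] := by
  rw [PySem.Str.find_eq, show (String.ofList [sep]).toList = [sep] from by simp]

-- the column of a layer whose remainder has no separator left
theorem stateToCol_neg (sep : Char) (pn pl rem : String)
    (h : PySem.Str.find rem (String.ofList [sep]) < 0) :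
    stateToCol (sep, pn, pl, rem) = [pn ++ rem] := by
  have hc : PySem.Chars.find rem.toList [sep] < 0 := by rwa [find_str_eq] at h
  unfold stateToCol
  simp [split1_of_find_neg sep rem.toList hc, String.ofList_toList]

-- the column of a layer whose remainder still contains the separator
theorem stateToCol_nonneg (sep : Char) (pn pl rem : String)
    (h : ¬ PySem.Str.find rem (String.ofList [sep]) < 0) :
    stateToCol (sep, pn, pl, rem)
      = (pn ++ PySem.Str.slice rem none (some (PySem.Str.find rem (String.ofList [sep]))))
          :: (split1 sep (rem.toList.drop ((PySem.Chars.find rem.toList [sep]).toNat + 1))).map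
              (fun x => pl ++ String.ofList x) := by
  have hc : 0 ≤ PySem.Chars.find rem.toList [sep] := by
    rw [find_str_eq] at h; omega
  have hpiece : pn ++ PySem.Str.slice rem none (some (PySem.Str.find rem (String.ofList [sep])))
      = pn ++ String.ofList (rem.toList.take (PySem.Chars.find rem.toList [sep]).toNat) := by
    have h0 : (0:Int) ≤ PySem.Str.find rem (String.ofList [sep]) := by rw [find_str_eq]; omega
    rw [← String.toList_inj, String.toList_append, String.toList_append,
      slice_to_toList rem _ h0, find_str_eq]
    simp
  unfold stateToCol
  rw [hpiece]
  simp [split1_of_find_nonneg sep rem.toList hc, List.map_map, Function.comp_def]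

-- a surviving layer's column, with both prefixes already equal
theorem stateToCol_eqpref (sep : Char) (pl rem : String) :
    stateToCol (sep, pl, pl, rem)
      = (split1 sep rem.toList).map (fun x => pl ++ String.ofList x) := by
  unfold stateToCol
  rcases hsp : split1 sep rem.toList with _ | ⟨h0, t0⟩
  · exact absurd hsp (split1_ne_nil sep rem.toList)
  · simp [List.map_map, Function.comp_def]

-- one stepB round produces exactly the head row and the surviving tails
theorem stepB_pieces (s : List (Char × String × String × String)) :
    (stepB s).1 = ((s.map stateToCol).map (fun col => col.headD "")).filter
        (fun j => 1 < PySem.Str.len j) := by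
  induction s with
  | nil => simp [stepB]
  | cons e rest ih =>
    obtain ⟨sep, pn, pl, rem⟩ := e
    by_cases hcut : PySem.Str.find rem (String.ofList [sep]) < 0
    · simp only [stepB, if_pos hcut, List.map_cons, stateToCol_neg sep pn pl rem hcut,
        List.filter_cons, List.headD_cons]
      rw [ih]; simp
    · simp only [stepB, if_neg hcut, List.map_cons, stateToCol_nonneg sep pn pl rem hcut,
        List.filter_cons, List.headD_cons]
      rw [ih]; simp

theorem stepB_next (s : List (Char × String × String × String)) :
    (stepB s).2.map stateToCol = ((s.map stateToCol).map List.tail).filter (· ≠ []) := by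
  induction s with
  | nil => simp [stepB]
  | cons e rest ih =>
    obtain ⟨sep, pn, pl, rem⟩ := e
    by_cases hcut : PySem.Str.find rem (String.ofList [sep]) < 0
    · simp only [stepB, if_pos hcut, List.map_cons, stateToCol_neg sep pn pl rem hcut,
        List.filter_cons, List.tail_cons]
      simpa using ih
    · have hc : 0 ≤ PySem.Chars.find rem.toList [sep] := by
        rw [find_str_eq] at hcut; omega
      have hrem' : (PySem.Str.slice rem (some (PySem.Str.find rem (String.ofList [sep]) + 1)) none).toList
          = rem.toList.drop ((PySem.Chars.find rem.toList [sep]).toNat + 1) := by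
        rw [slice_from_toList rem _ (by rw [find_str_eq]; omega : 0 ≤ PySem.Str.find rem (String.ofList [sep]) + 1),
          find_str_eq, toNat_add_one _ hc]
      have hcol' : stateToCol (sep, pl, pl,
            PySem.Str.slice rem (some (PySem.Str.find rem (String.ofList [sep]) + 1)) none)
          = (split1 sep (rem.toList.drop ((PySem.Chars.find rem.toList [sep]).toNat + 1))).map
              (fun x => pl ++ String.ofList x) := by
        rw [stateToCol_eqpref, hrem']
      have hne : (split1 sep (rem.toList.drop ((PySem.Chars.find rem.toList [sep]).toNat + 1))).map
              (fun x => pl ++ String.ofList x) ≠ [] := by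
        simp only [ne_eq, List.map_eq_nil_iff]
        exact split1_ne_nil _ _
      simp only [stepB, if_neg hcut, List.map_cons, stateToCol_nonneg sep pn pl rem hcut,
        List.filter_cons, List.tail_cons, hcol']
      rw [if_pos (by simpa using hne)]
      simpa using ih

-- dropping the empty columns changes neither the filtered head row …
theorem filter_headD (cols : List (List String)) :
    ((cols.filter (· ≠ [])).map (fun col => col.headD "")).filter (fun j => 1 < PySem.Str.len j)
      = (cols.map (fun col => col.headD "")).filter (fun j => 1 < PySem.Str.len j) := by
  induction cols with
  | nil => rfl
  | cons c t ih =>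
    by_cases hc : c = []
    · subst hc
      simp only [List.filter_cons, List.map_cons]
      rw [if_neg (by simp), if_neg (by decide)]
      exact ih
    · simp only [List.filter_cons, List.map_cons]
      rw [if_pos (by simp [hc])]
      simp only [List.map_cons, List.filter_cons]
      rw [ih]

-- … nor the surviving tails
theorem filter_tail (cols : List (List String)) :
    (((cols.filter (· ≠ [])).map List.tail).filter (· ≠ []))
      = ((cols.map List.tail).filter (· ≠ [])) := by
  induction cols with
  | nil => rfl
  | cons c t ih =>
    by_cases hc : c = []
    · subst hc
      simp only [List.filter_cons, List.map_cons, List.tail_nil]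
      rw [if_neg (by simp), if_neg (by simp)]
      exact ih
    · simp only [List.filter_cons, List.map_cons]
      rw [if_pos (by simp [hc]), List.map_cons, List.filter_cons, ih]

theorem emitRows_cons (header : String) (row : List String) (R : List (List String)) :
    emitRows header (row :: R)
      = (if ((row.filter (fun j => 1 < PySem.Str.len j)).isEmpty)
          then []
          else [header ++ "/" ++ PySem.Str.join "/" (row.filter (fun j => 1 < PySem.Str.len j))])
        ++ emitRows header R := by
  unfold emitRows
  rw [List.filterMap_cons]
  by_cases hp : (row.filter (fun j => 1 < PySem.Str.len j)).isEmpty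
  · rw [if_pos hp, if_pos hp, List.nil_append]
  · rw [if_neg hp, if_neg hp, List.singleton_append]

theorem emitRows_of_no_cols (header : String) (cols : List (List String))
    (h : cols.filter (· ≠ []) = []) : emitRows header (transposeRec cols) = [] := by
  rw [transposeRec, if_pos]
  · rfl
  · rw [List.filter_eq_nil_iff] at h
    simp only [List.all_eq_true, List.isEmpty_iff]
    intro x hx
    have := h x hx
    simpa using this

theorem buildB_eq_aux (header : String) (n : Nat) :
    ∀ (s : List (Char × String × String × String)) (cols : List (List String)),
      stMeasure s ≤ n → s.map stateToCol = cols.filter (· ≠ []) →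
      buildB header s = emitRows header (transposeRec cols) := by
  induction n with
  | zero =>
    intro s cols hm hcols
    have hs : s = [] := by
      cases s with
      | nil => rfl
      | cons e t => simp [stMeasure] at hm
    subst hs
    rw [buildB, dif_pos rfl, emitRows_of_no_cols header cols (by simpa using hcols.symm)]
  | succ n ih =>
    intro s cols hm hcols
    by_cases hs : s = []
    · subst hs
      rw [buildB, dif_pos rfl, emitRows_of_no_cols header cols (by simpa using hcols.symm)]
    · have hfil : cols.filter (· ≠ []) ≠ [] := by
        rw [← hcols]
        simpa using hs
      have hall : ¬ cols.all List.isEmpty = true := by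
        intro hall
        apply hfil
        rw [List.filter_eq_nil_iff]
        intro x hx
        have := (List.all_eq_true.mp hall) x hx
        simpa [List.isEmpty_iff] using this
      have hpieces : (stepB s).1
          = (cols.map (fun col => col.headD "")).filter (fun j => 1 < PySem.Str.len j) := by
        rw [stepB_pieces, hcols, filter_headD]
      have hnext : (stepB s).2.map stateToCol = (cols.map List.tail).filter (· ≠ []) := by
        rw [stepB_next, hcols, filter_tail]
      have hmeas : stMeasure (stepB s).2 ≤ n := by
        have h1 := stepB_measure s
        have h2 : 1 ≤ s.length := List.length_pos_of_ne_nil hs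
        omega
      rw [buildB, dif_neg hs]
      dsimp only
      rw [transposeRec, if_neg hall, emitRows_cons, hpieces,
        ih (stepB s).2 (cols.map List.tail) hmeas hnext]

theorem buildB_eq (header : String) (s : List (Char × String × String × String))
    (cols : List (List String)) (hcols : s.map stateToCol = cols.filter (· ≠ [])) :
    buildB header s = emitRows header (transposeRec cols) :=
  buildB_eq_aux header (stMeasure s) s cols (le_refl _) hcols

-- a freshly initialised layer's column is its prefixed split list
theorem stateToCol_init (c : Char) (pfx l : String) :
    stateToCol (c, "", pfx, l) = prefCol pfx (pySplit l (String.ofList [c])) := by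
  unfold stateToCol prefCol
  rw [pySplit_single]
  rcases hsp : split1 c l.toList with _ | ⟨h0, t0⟩
  · exact absurd hsp (split1_ne_nil _ _)
  · simp

-- port B at a successful split is the same emitRows ∘ transposeRec
theorem B_form (inchi header l1 : String) (rest : List String)
    (h : pySplit inchi "/" = header :: l1 :: rest) :
    composite_inchi_to_simple_alt inchi
      = emitRows header (transposeRec ((colPairs l1 rest).map (fun cp => prefCol cp.2 cp.1))) := by
  unfold composite_inchi_to_simple_alt
  rw [h]
  dsimp only
  apply buildB_eq
  rw [List.filter_eq_self.mpr]
  · simp only [colPairs, List.map_cons, List.map_map]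
    congr 1
    · rw [stateToCol_init, show String.ofList ['.'] = "." from rfl]
    · apply List.map_congr_left
      intro l _
      simp only [Function.comp_apply]
      rw [stateToCol_init, show String.ofList [';'] = ";" from rfl]
  · intro col hcol
    rcases List.mem_map.mp hcol with ⟨cp, _, rfl⟩
    simp [prefCol]

-- ===== VERDICT (by name: the statement is the Claim_ definition above) =====
theorem composite_inchi_to_simple_spec : Claim_equal_composite_inchi_to_simple := by
  intro inchi _ _
  unfold Spec_composite_inchi_to_simple
  cases hsp : pySplit inchi "/" with
  | nil => unfold composite_inchi_to_simple composite_inchi_to_simple_alt; rw [hsp]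
  | cons header t =>
    cases t with
    | nil => unfold composite_inchi_to_simple composite_inchi_to_simple_alt; rw [hsp]
    | cons l1 rest =>
      rw [A_form inchi header l1 rest hsp, B_form inchi header l1 rest hsp,
        pyZipLongest_eq_transposeRec]
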